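-- pv_equiv track=rewrite | github.com/BerBai/codedb | MarsCode/小C 点菜问题.py | solution
-- ===== SOURCE A (Python) =====
-- def solution(m: int, w: list) -> int:
--     menus = {}
--     ans = 0
--     for item in w:
--         if item <= m:
--             menus[item] = menus.get(item, 0) + 1
--             ans = max(ans, menus[item])
--     return ans
-- ===== SOURCE B (Python) =====
-- def solution(m: int, w: list) -> int:
--     qual = sorted(x for x in w if x <= m)
--     best = 0
--     run = 0
--     prev = None
--     for x in qual:
--         if prev is not None and x == prev:
--             run += 1
--         else:
--             run = 1
--         if run > best:
--             best = run
--         prev = x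
--     return best
-- ===== Notes on version B (the rewrite author's own statement) =====
-- stated objective: alternative
-- what changed: Replaces A's hash-map counting with an interleaved running maximum by sort-then-scan: sort the qualifying items so equal values are adjacent, then one linear scan finds the longest run of equal values; no dictionary and no per-value counters exist.
import Mathlib
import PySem

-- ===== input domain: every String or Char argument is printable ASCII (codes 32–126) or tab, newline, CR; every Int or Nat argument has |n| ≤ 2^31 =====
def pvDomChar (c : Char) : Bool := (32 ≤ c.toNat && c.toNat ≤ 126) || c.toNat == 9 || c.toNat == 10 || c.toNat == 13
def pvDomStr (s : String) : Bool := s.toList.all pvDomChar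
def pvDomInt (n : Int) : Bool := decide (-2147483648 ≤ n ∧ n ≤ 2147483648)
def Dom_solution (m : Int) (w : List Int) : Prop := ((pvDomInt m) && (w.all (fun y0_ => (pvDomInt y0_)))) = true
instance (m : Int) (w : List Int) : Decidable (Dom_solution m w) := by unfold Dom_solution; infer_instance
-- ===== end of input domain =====

-- B replaces A's dict counting with an interleaved running maximum by sort-then-scan:
-- sort the qualifying items and find the longest run of equal values; objective: alternative.

-- ===== PORT A =====
def solution (m : Int) (w : List Int) : Int :=
  (w.foldl (fun (s : PySem.Dict Int Int × Int) item =>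
      if item ≤ m then
        let c := s.1.getD item 0 + 1
        (s.1.insert item c, max s.2 c)
      else s) (PySem.Dict.empty, 0)).2

-- ===== PORT B =====
def solution_alt (m : Int) (w : List Int) : Int :=
  let qual := PySem.List.sorted (w.filter (fun x => decide (x ≤ m))) (fun x => x) false
  (qual.foldl (fun (s : Int × Int × Option Int) x =>
      let run := if s.2.2 = some x then s.2.1 + 1 else 1
      let best := if run > s.1 then run else s.1
      (best, run, some x)) (0, 0, none)).1

-- ===== PRECONDITION & SPEC =====
def Spec_solution (m : Int) (w : List Int) (out : Int) : Prop := out = solution_alt m w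
instance (m : Int) (w : List Int) (out : Int) : Decidable (Spec_solution m w out) := by unfold Spec_solution; infer_instance

-- ===== CLAIM (what is proved, stated in full; the proofs are below) =====
def Claim_equal_solution : Prop := ∀ (m : Int) (w : List Int), Dom_solution m w → Spec_solution m w (solution m w)

-- ===== LEMMAS AND PROOFS =====

-- B's scan step and the running max of total counts, named for the proofs
def pvStep (s : Int × Int × Option Int) (x : Int) : Int × Int × Option Int :=
  let run := if s.2.2 = some x then s.2.1 + 1 else 1
  let best := if run > s.1 then run else s.1
  (best, run, some x)

def pvBst (l : List Int) : Int := (l.map (fun y => (l.count y : Int))).foldl max 0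

def pvRn (l : List Int) : Int := l.getLast?.elim 0 (fun z => (l.count z : Int))

theorem solution_alt_eq (m : Int) (w : List Int) :
    solution_alt m w
      = ((PySem.List.sorted (w.filter (fun x => decide (x ≤ m))) (fun x => x) false).foldl
          pvStep (0, 0, none)).1 := rfl

-- pull a `max a b` initial accumulator out of a running max of a projection
theorem pv_foldl_max_pull_f (f : Int → Int) (l : List Int) :
    ∀ (a b : Int), l.foldl (fun acc z => max acc (f z)) (max a b)
      = max (l.foldl (fun acc z => max acc (f z)) a) b := by
  induction l with
  | nil => intro a b; simp
  | cons x xs ih =>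
      intro a b
      simp only [List.foldl_cons]
      rw [max_right_comm, ih]

-- a running max from a fixed init depends only on the set of elements
theorem pv_foldl_max_le_of_subset (l l' : List Int) (a : Int)
    (hs : ∀ y ∈ l, y ∈ l') : l.foldl max a ≤ l'.foldl max a := by
  rcases PySem.List.foldl_max_mem l a with h | h
  · rw [h]; exact (PySem.List.le_foldl_max l' a).1
  · exact (PySem.List.le_foldl_max l' a).2 _ (hs _ h)

theorem pv_foldl_max_eq_of_mem_iff (l l' : List Int) (a : Int)
    (hs : ∀ y, y ∈ l ↔ y ∈ l') : l.foldl max a = l'.foldl max a :=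
  le_antisymm (pv_foldl_max_le_of_subset l l' a fun y hy => (hs y).mp hy)
    (pv_foldl_max_le_of_subset l' l a fun y hy => (hs y).mpr hy)

-- A's conditional loop is the unconditional loop over the filtered list
theorem pv_loop_filter (m : Int) (l : List Int) :
    ∀ (s : PySem.Dict Int Int × Int),
      l.foldl (fun (s : PySem.Dict Int Int × Int) item =>
          if item ≤ m then
            let c := s.1.getD item 0 + 1
            (s.1.insert item c, max s.2 c)
          else s) s
      = (l.filter (fun x => decide (x ≤ m))).foldl
          (fun (s : PySem.Dict Int Int × Int) item =>
            let c := s.1.getD item 0 + 1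
            (s.1.insert item c, max s.2 c)) s := by
  induction l with
  | nil => intro s; simp
  | cons x xs ih =>
      intro s
      by_cases hx : x ≤ m <;> simp [hx, ih]

-- the running max of the unconditional loop is the running max of total counts
theorem pv_loop_max (l : List Int) :
    ∀ (d : PySem.Dict Int Int) (a : Int),
      (l.foldl (fun (s : PySem.Dict Int Int × Int) item =>
          let c := s.1.getD item 0 + 1
          (s.1.insert item c, max s.2 c)) (d, a)).2
      = l.foldl (fun acc y => max acc (d.getD y 0 + (l.count y : Int))) a := by
  induction l with
  | nil => intro d a; simp
  | cons x xs ih =>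
      intro d a
      simp only [List.foldl_cons]
      rw [ih]
      have hf : (fun (acc y : Int) => max acc ((d.insert x (d.getD x 0 + 1)).getD y 0 + (xs.count y : Int)))
          = fun (acc y : Int) => max acc (d.getD y 0 + ((x :: xs).count y : Int)) := by
        funext acc y
        rw [PySem.Dict.getD_insert]
        by_cases hy : y = x
        · subst hy
          rw [if_pos rfl, List.count_cons_self]
          push_cast
          omega
        · simp [hy, Ne.symm hy]
      rw [hf]
      have hcx : d.getD x 0 + ((x :: xs).count x : Int) = (d.getD x 0 + 1) + (xs.count x : Int) := by
        rw [List.count_cons_self]; push_cast; ring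
      by_cases hx : x ∈ xs
      · rw [pv_foldl_max_pull_f (fun y => d.getD y 0 + ((x :: xs).count y : Int)),
           pv_foldl_max_pull_f (fun y => d.getD y 0 + ((x :: xs).count y : Int))]
        have hP := (PySem.List.le_foldl_max_int xs (fun y => d.getD y 0 + ((x :: xs).count y : Int)) a).2 x hx
        have hcnt : (0 : Int) ≤ (xs.count x : Int) := Int.natCast_nonneg _
        rw [max_eq_left (le_trans (by omega) hP), max_eq_left hP]
      · have h0 : xs.count x = 0 := List.count_eq_zero.mpr hx
        rw [hcx, h0]
        norm_num

-- pvBst bounds: it dominates every per-element count and is reached at 0 or a count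
theorem pv_bst_ge (l : List Int) (y : Int) (hy : y ∈ l) : (l.count y : Int) ≤ pvBst l := by
  unfold pvBst
  exact (PySem.List.le_foldl_max (l.map (fun y => (l.count y : Int))) 0).2 _
    (List.mem_map.mpr ⟨y, hy, rfl⟩)

theorem pv_bst_nonneg (l : List Int) : 0 ≤ pvBst l :=
  (PySem.List.le_foldl_max (l.map (fun y => (l.count y : Int))) 0).1

-- appending one element to the list turns pvBst into a single max
theorem pv_bst_concat (q : List Int) (x : Int) :
    pvBst (q ++ [x]) = max (pvBst q) ((q.count x : Int) + 1) := by
  have hcnt : ∀ y, ((q ++ [x]).count y : Int)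
      = (q.count y : Int) + (if y = x then 1 else 0) := by
    intro y
    rw [List.count_append]
    by_cases hy : y = x
    · simp [hy]
    · simp [hy, Ne.symm hy]
  have hfold : pvBst (q ++ [x])
      = max ((q.map (fun y => ((q ++ [x]).count y : Int))).foldl max 0)
            (((q ++ [x]).count x : Int)) := by
    unfold pvBst
    rw [List.map_append, List.foldl_append]
    simp
  have hfx : ((q ++ [x]).count x : Int) = (q.count x : Int) + 1 := by
    rw [hcnt x, if_pos rfl]
  have hBq_le : pvBst q ≤ (q.map (fun y => ((q ++ [x]).count y : Int))).foldl max 0 := by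
    rcases PySem.List.foldl_max_mem (q.map (fun y => (q.count y : Int))) 0 with he | he
    · unfold pvBst; rw [he]
      exact (PySem.List.le_foldl_max (q.map (fun y => ((q ++ [x]).count y : Int))) 0).1
    · rcases List.mem_map.mp he with ⟨y, hy, hval⟩
      have h1 : pvBst q = (q.count y : Int) := by unfold pvBst; rw [← hval]
      have h2 := (PySem.List.le_foldl_max (q.map (fun y => ((q ++ [x]).count y : Int))) 0).2
        _ (List.mem_map.mpr ⟨y, hy, rfl⟩)
      have h3 : (q.count y : Int) ≤ ((q ++ [x]).count y : Int) := by
        rw [hcnt y]; split_ifs <;> omega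
      omega
  have hG_le : (q.map (fun y => ((q ++ [x]).count y : Int))).foldl max 0
      ≤ max (pvBst q) ((q.count x : Int) + 1) := by
    rcases PySem.List.foldl_max_mem (q.map (fun y => ((q ++ [x]).count y : Int))) 0 with he | he
    · rw [he]
      have := pv_bst_nonneg q
      exact le_max_of_le_left this
    · rcases List.mem_map.mp he with ⟨y, hy, hval⟩
      rw [← hval, hcnt y]
      by_cases hyx : y = x
      · subst hyx
        rw [if_pos rfl]
        exact le_max_of_le_right (le_refl _)
      · rw [if_neg hyx, add_zero]
        exact le_max_of_le_left (pv_bst_ge q y hy)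
  rw [hfold, hfx]
  apply le_antisymm
  · apply max_le hG_le
    exact le_max_of_le_right (le_refl _)
  · apply max_le
    · exact le_max_of_le_left hBq_le
    · exact le_max_of_le_right (le_refl _)

-- last element of a ≤-sorted list dominates its members
theorem pv_le_getLast : ∀ (l : List Int) (y z : Int), l.Pairwise (· ≤ ·) →
    y ∈ l → l.getLast? = some z → y ≤ z := by
  intro l
  induction l with
  | nil => intro y z _ hy _; simp at hy
  | cons a t iht =>
      intro y z hp hy hz
      cases t with
      | nil =>
          simp at hy hz
          omega
      | cons b u =>
          rw [List.getLast?_cons_cons] at hz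
          rcases List.mem_cons.mp hy with rfl | hy'
          · have hz_mem : z ∈ b :: u := by
              have := List.mem_of_getLast? (l := b :: u) (a := z)
              exact this hz
            exact (List.pairwise_cons.mp hp).1 z hz_mem
          · exact iht y z (List.pairwise_cons.mp hp).2 hy' hz

-- in a ≤-sorted q ++ [x], if x is not q's last element then x ∉ q
theorem pv_not_mem_of_sorted (q : List Int) (x : Int)
    (hs : (q ++ [x]).Pairwise (· ≤ ·)) (hne : q.getLast? ≠ some x) : x ∉ q := by
  intro hx
  rcases List.pairwise_append.mp hs with ⟨hq, _, hcross⟩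
  have hqe : q ≠ [] := List.ne_nil_of_mem hx
  have hlast : q.getLast? = some (q.getLast hqe) := List.getLast?_eq_some_getLast hqe
  have hle1 : x ≤ q.getLast hqe := pv_le_getLast q x (q.getLast hqe) hq hx hlast
  have hle2 : q.getLast hqe ≤ x := hcross _ (List.getLast_mem hqe) x (List.mem_singleton.mpr rfl)
  have : q.getLast hqe = x := le_antisymm hle2 hle1
  exact hne (by rw [hlast, this])

-- invariant of B's scan over a ≤-sorted list
theorem pv_scan_inv (p : List Int) (hs : p.Pairwise (· ≤ ·)) :
    p.foldl pvStep (0, 0, none) = (pvBst p, pvRn p, p.getLast?) := by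
  induction p using List.reverseRecOn with
  | nil => simp [pvBst, pvRn]
  | append_singleton q x ih =>
      have hq : q.Pairwise (· ≤ ·) := (List.pairwise_append.mp hs).1
      rw [List.foldl_append, ih hq, List.foldl_cons, List.foldl_nil]
      have hlast : (q ++ [x]).getLast? = some x := by
        simp [List.getLast?_append]
      by_cases hprev : q.getLast? = some x
      · -- x extends the current run
        have hqe : q ≠ [] := by
          intro h; rw [h] at hprev; simp at hprev
        have hrn : pvRn q = (q.count x : Int) := by
          unfold pvRn; rw [hprev]; rfl
        have hcq : ((q ++ [x]).count x : Int) = (q.count x : Int) + 1 := by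
          rw [List.count_append]; simp
        have hrn' : pvRn (q ++ [x]) = (q.count x : Int) + 1 := by
          unfold pvRn; rw [hlast]; simp only [Option.elim_some]; exact hcq
        rw [pv_bst_concat, hrn', hlast]
        simp [pvStep, hprev, hrn, Prod.ext_iff]
        split_ifs with h <;> omega
      · -- x starts a fresh run; sortedness means x does not occur in q
        have hxq : x ∉ q := pv_not_mem_of_sorted q x hs hprev
        have hc0 : q.count x = 0 := List.count_eq_zero.mpr hxq
        have hcq : ((q ++ [x]).count x : Int) = 1 := by
          rw [List.count_append, hc0]; simp
        have hrn' : pvRn (q ++ [x]) = 1 := by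
          unfold pvRn; rw [hlast]; simp only [Option.elim_some]; exact hcq
        rw [pv_bst_concat, hrn', hlast]
        simp [pvStep, hprev, hc0, Prod.ext_iff]
        split_ifs with h <;> omega

-- ===== VERDICT (by name: the statement is the Claim_ definition above) =====
theorem solution_spec : Claim_equal_solution := by
  intro m w _
  unfold Spec_solution solution
  rw [solution_alt_eq, pv_loop_filter, pv_loop_max]
  set qual := w.filter (fun x => decide (x ≤ m)) with hq
  set srt := PySem.List.sorted qual (fun x => x) false with hsrt
  have hperm : srt.Perm qual := PySem.List.sorted_perm qual (fun x => x) false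
  have hpair : srt.Pairwise (· ≤ ·) := by
    have := PySem.List.sorted_pairwise qual (fun x => x)
    simpa using this
  rw [pv_scan_inv srt hpair]
  simp only []
  unfold pvBst
  have hA : qual.foldl (fun acc y => max acc (PySem.Dict.empty.getD y 0 + (qual.count y : Int))) 0
      = (qual.map (fun y => (qual.count y : Int))).foldl max 0 := by
    rw [List.foldl_map]
    simp [PySem.Dict.getD_empty]
  rw [hA]
  apply pv_foldl_max_eq_of_mem_iff
  intro z
  constructor
  · intro hz
    rcases List.mem_map.mp hz with ⟨y, hy, rfl⟩
    exact List.mem_map.mpr ⟨y, hperm.mem_iff.mpr hy, by rw [hperm.count_eq]⟩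
  · intro hz
    rcases List.mem_map.mp hz with ⟨y, hy, rfl⟩
    exact List.mem_map.mpr ⟨y, hperm.mem_iff.mp hy, by rw [hperm.count_eq]⟩
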